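-- pv_equiv track=rewrite | github.com/Qischer/signify_backend | model/model_util.py | clean_array
-- ===== SOURCE A (Python) =====
-- def clean_array(arr):
--     result = []
--     i = 0
--
--     while i < len(arr):
--         count = 1
--         while i + 1 < len(arr) and arr[i] == arr[i + 1]:
--             count += 1
--             i += 1
--
--         if count > 5:
--             result.append(arr[i])
--         i += 1  # Move to the next distinct element
--
--     return result
-- ===== SOURCE B (Python) =====
-- def clean_array(arr):
--     n = len(arr)
--     return [arr[i] for i in range(n)
--             if (i == n - 1 or arr[i] != arr[i + 1])
--             and i >= 5
--             and all(arr[i - k] == arr[i] for k in range(1, 6))]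
-- ===== Notes on version B (the rewrite author's own statement) =====
-- stated objective: alternative
-- what changed: Replaced run counting with a stateless per-index windowed test: keep arr[i] exactly when i ends a run of equal elements and the five preceding elements all equal arr[i], expressed as a single comprehension with no run bookkeeping.
import Mathlib
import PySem

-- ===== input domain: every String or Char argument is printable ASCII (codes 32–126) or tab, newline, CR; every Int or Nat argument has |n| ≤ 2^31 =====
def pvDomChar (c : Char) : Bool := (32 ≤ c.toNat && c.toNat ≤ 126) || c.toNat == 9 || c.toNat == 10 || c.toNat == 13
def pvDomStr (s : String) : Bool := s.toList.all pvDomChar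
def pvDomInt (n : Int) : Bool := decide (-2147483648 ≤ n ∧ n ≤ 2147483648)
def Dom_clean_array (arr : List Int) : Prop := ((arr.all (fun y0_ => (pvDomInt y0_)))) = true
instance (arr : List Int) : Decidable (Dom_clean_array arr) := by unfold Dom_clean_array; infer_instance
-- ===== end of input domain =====

-- B replaces A's manual run counting with a stateless per-index test: keep arr[i]
-- exactly when i ends a run and the five preceding elements equal arr[i]; objective:
-- alternative decomposition, same cost.

-- ===== PORT A =====
-- A's inner while loop: advances i and count while arr[i] == arr[i+1]; returns (count, i)
def cleanRun (arr : List Int) (i count : Nat) : Nat × Nat :=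
  if _h : i + 1 < arr.length ∧ arr.getD i 0 = arr.getD (i + 1) 0 then
    cleanRun arr (i + 1) (count + 1)
  else
    (count, i)
termination_by arr.length - i

-- needed by cleanAux's termination proof (cited in its decreasing_by)
theorem cleanRun_ge (arr : List Int) (i count : Nat) : i ≤ (cleanRun arr i count).2 := by
  unfold cleanRun
  split
  · exact le_trans (Nat.le_succ i) (cleanRun_ge arr (i + 1) (count + 1))
  · exact le_refl i
termination_by arr.length - i

-- A's outer while loop over i, appending arr[i] when the run count exceeds 5
def cleanAux (arr : List Int) (i : Nat) : List Int :=
  if h : i < arr.length then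
    let r := cleanRun arr i 1
    (if r.1 > 5 then [arr.getD r.2 0] else []) ++ cleanAux arr (r.2 + 1)
  else
    []
termination_by arr.length - i
decreasing_by
  have := cleanRun_ge arr i 1
  omega

def clean_array (arr : List Int) : List Int := cleanAux arr 0

-- ===== PORT B =====
-- B's per-index condition: (i == n-1 or arr[i] != arr[i+1]) and i >= 5 and
-- all(arr[i-k] == arr[i] for k in range(1,6))
def cleanCond (arr : List Int) (i : Nat) : Bool :=
  (i == arr.length - 1 || !(arr.getD i 0 == arr.getD (i + 1) 0)) &&
  decide (5 ≤ i) &&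
  ([1, 2, 3, 4, 5].all (fun k => arr.getD (i - k) 0 == arr.getD i 0))

-- the comprehension [arr[i] for i in range(n) if cond(i)]
def clean_array_alt (arr : List Int) : List Int :=
  ((List.range arr.length).filter (cleanCond arr)).map (fun i => arr.getD i 0)

-- ===== PRECONDITION & SPEC =====
def Spec_clean_array (arr : List Int) (out : List Int) : Prop := out = clean_array_alt arr
instance (arr : List Int) (out : List Int) : Decidable (Spec_clean_array arr out) := by unfold Spec_clean_array; infer_instance

-- ===== CLAIM (what is proved, stated in full; the proofs are below) =====
def Claim_equal_clean_array : Prop := ∀ (arr : List Int), Dom_clean_array arr → Spec_clean_array arr (clean_array arr)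

-- ===== LEMMAS AND PROOFS =====

theorem pvDrop_cons (arr : List Int) (i : Nat) (x : Int) (xs : List Int)
    (hd : arr.drop i = x :: xs) :
    i < arr.length ∧ arr.getD i 0 = x ∧ arr.drop (i + 1) = xs := by
  have hlen : i < arr.length := by
    have := congrArg List.length hd
    simp [List.length_drop] at this
    omega
  refine ⟨hlen, ?_, ?_⟩
  · rw [List.getD_eq_getElem?_getD, show i = i + 0 by omega, ← List.getElem?_drop, hd]
    simp
  · have h2 : arr.drop (i + 1) = (arr.drop i).drop 1 := by
      rw [List.drop_drop]
    rw [h2, hd]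
    simp

theorem pvGetD_takeWhile (x : Int) (xs : List Int) (t : Nat)
    (ht : t ≤ (xs.takeWhile (· == x)).length) : (x :: xs).getD t 0 = x := by
  induction xs generalizing t with
  | nil => simp at ht; simp [ht]
  | cons y ys ih =>
    cases t with
    | zero => simp
    | succ t' =>
      by_cases hy : (y == x)
      · have hyx : y = x := by simpa using hy
        subst hyx
        have ht' : t' ≤ (ys.takeWhile (· == y)).length := by
          simp at ht; omega
        simpa using ih t' ht'
      · simp [hy] at ht

theorem pvDropWhile_eq_drop (l : List Int) (p : Int → Bool) :
    l.dropWhile p = l.drop (l.takeWhile p).length := by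
  calc l.dropWhile p
      = ((l.takeWhile p) ++ l.dropWhile p).drop (l.takeWhile p).length := by
        rw [List.drop_left]
    _ = l.drop (l.takeWhile p).length := by
        rw [List.takeWhile_append_dropWhile]

theorem cleanRun_spec (arr : List Int) (i c : Nat) (x : Int) (xs : List Int)
    (hd : arr.drop i = x :: xs) :
    cleanRun arr i c =
      (c + (xs.takeWhile (· == x)).length, i + (xs.takeWhile (· == x)).length) := by
  obtain ⟨hi, hx, hdrop⟩ := pvDrop_cons arr i x xs hd
  cases xs with
  | nil =>
    have hlen : arr.length ≤ i + 1 := by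
      have := congrArg List.length hdrop
      simp [List.length_drop] at this
      omega
    unfold cleanRun
    rw [dif_neg (by omega)]
    simp
  | cons y ys =>
    obtain ⟨hi1, hy, _⟩ := pvDrop_cons arr (i + 1) y ys hdrop
    by_cases hxy : y = x
    · subst hxy
      unfold cleanRun
      rw [dif_pos ⟨hi1, by rw [hx, hy]⟩]
      rw [cleanRun_spec arr (i + 1) (c + 1) y ys hdrop]
      simp
      constructor <;> omega
    · unfold cleanRun
      rw [dif_neg (by rw [hx, hy]; exact fun hh => hxy hh.2.symm)]
      have hbeq : (y == x) = false := by simp [hxy]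
      simp [hbeq]
termination_by arr.length - i
decreasing_by omega


theorem pvRange'_split (s a b : Nat) : List.range' s (a + b) = List.range' s a ++ List.range' (s + a) b := by
  induction a generalizing s with
  | zero => simp
  | succ a ih =>
    rw [show a + 1 + b = (a + b) + 1 from by omega, List.range'_succ, ih (s + 1),
        List.range'_succ, List.cons_append, show s + 1 + a = s + (a + 1) from by omega]

theorem pvDropWhile_head (p : Int → Bool) (l : List Int) (y : Int) (ys : List Int)
    (h : l.dropWhile p = y :: ys) : p y = false := by
  induction l with
  | nil => simp at h
  | cons a l ih =>
    by_cases hp : p a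
    · rw [List.dropWhile_cons_of_pos hp] at h; exact ih h
    · rw [List.dropWhile_cons_of_neg hp] at h
      cases h
      simpa using hp

-- main invariant: from a run start i, A's loop produces exactly B's filtered window
-- selection over the indices i..n-1
theorem cleanAux_eq_filter (arr : List Int) (i : Nat)
    (hstart : i = 0 ∨ (0 < i ∧ (i < arr.length → arr.getD (i - 1) 0 ≠ arr.getD i 0))) :
    cleanAux arr i =
      ((List.range' i (arr.length - i)).filter (cleanCond arr)).map
        (fun j => arr.getD j 0) := by
  by_cases h : i < arr.length
  · cases hd : arr.drop i with
    | nil =>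
      exfalso
      have := congrArg List.length hd
      simp [List.length_drop] at this
      omega
    | cons x xs =>
      obtain ⟨hi, hx, hdrop⟩ := pvDrop_cons arr i x xs hd
      have hr := cleanRun_spec arr i 1 x xs hd
      set t := (xs.takeWhile (· == x)).length with ht
      have hn : arr.length = i + 1 + xs.length := by
        have := congrArg List.length hd
        simp [List.length_drop] at this
        omega
      have htle : t ≤ xs.length := by
        rw [ht]; exact (List.takeWhile_prefix _).length_le
      have hrun : ∀ d : Nat, d ≤ t → arr.getD (i + d) 0 = x := by
        intro d hdle
        have e1 : arr.getD (i + d) 0 = (arr.drop i).getD d 0 := by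
          rw [List.getD_eq_getElem?_getD, List.getD_eq_getElem?_getD, List.getElem?_drop]
        rw [e1, hd]
        exact pvGetD_takeWhile x xs d hdle
      have hnext : i + t + 1 < arr.length → arr.getD (i + t + 1) 0 ≠ x := by
        intro hlt
        have hdw : arr.drop (i + t + 1) = xs.dropWhile (· == x) := by
          have e2 : arr.drop (i + t + 1) = (arr.drop (i + 1)).drop t := by
            rw [List.drop_drop]
            congr 1
            omega
          rw [e2, hdrop, pvDropWhile_eq_drop, ← ht]
        cases hdw' : xs.dropWhile (· == x) with
        | nil =>
          exfalso
          have := congrArg List.length (hdw.trans hdw')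
          simp [List.length_drop] at this
          omega
        | cons y ys =>
          obtain ⟨_, hy, _⟩ := pvDrop_cons arr (i + t + 1) y ys (hdw.trans hdw')
          rw [hy]
          have := pvDropWhile_head (· == x) xs y ys hdw'
          simpa using this
      have hitn : i + t < arr.length := by omega
      have hsplit : List.range' i (arr.length - i) =
          (List.range' i t ++ [i + t]) ++ List.range' (i + t + 1) (arr.length - (i + t + 1)) := by
        have e : arr.length - i = (t + 1) + (arr.length - (i + t + 1)) := by omega
        rw [e, pvRange'_split i (t + 1) (arr.length - (i + t + 1)),
            pvRange'_split i t 1]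
        simp [List.range']
        omega
      have hfalse : ∀ j ∈ List.range' i t, ¬ (cleanCond arr j = true) := by
        intro j hj
        rw [List.mem_range'_1] at hj
        have hj1 : arr.getD j 0 = x := by
          have e3 : j = i + (j - i) := by omega
          rw [e3]; exact hrun (j - i) (by omega)
        have hj2 : arr.getD (j + 1) 0 = x := by
          have e3 : j + 1 = i + (j - i + 1) := by omega
          rw [e3]; exact hrun (j - i + 1) (by omega)
        have hne : ¬ (j = arr.length - 1) := by omega
        rw [List.getD_eq_getElem?_getD] at hj1 hj2
        simp [cleanCond, hj1, hj2, hne]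
      have hcx : arr.getD i 0 = x := by
        have := hrun 0 (Nat.zero_le t); simpa using this
      have hcond : cleanCond arr (i + t) = true ↔ 5 ≤ t := by
        constructor
        · intro hc
          by_contra h5
          simp only [cleanCond, Bool.and_eq_true, List.all_eq_true, decide_eq_true_iff] at hc
          obtain ⟨⟨_, hge⟩, hall⟩ := hc
          have hipos : 0 < i := by omega
          have hk : (t + 1 : Nat) ∈ [1, 2, 3, 4, 5] := by
            simp only [List.mem_cons, List.not_mem_nil, or_false]
            omega
          have hw := hall (t + 1) hk
          rw [beq_iff_eq] at hw
          have e4 : i + t - (t + 1) = i - 1 := by omega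
          rw [e4, hrun t le_rfl] at hw
          rcases hstart with h0 | ⟨_, hne⟩
          · omega
          · exact hne h (by rw [hw, hcx])
        · intro h5
          simp only [cleanCond, Bool.and_eq_true, Bool.or_eq_true, List.all_eq_true,
            decide_eq_true_iff]
          refine ⟨⟨?_, by omega⟩, ?_⟩
          · by_cases he : i + t = arr.length - 1
            · left; simpa using he
            · right
              have hlt : i + t + 1 < arr.length := by omega
              have := hnext hlt
              simp only [Bool.not_eq_true', beq_eq_false_iff_ne]
              rw [hrun t le_rfl]
              exact fun hh => this hh.symm
          · intro k hk
            have hk5 : 1 ≤ k ∧ k ≤ 5 := by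
              simp at hk
              rcases hk with h1 | h1 | h1 | h1 | h1 <;> omega
            rw [beq_iff_eq]
            have e5 : i + t - k = i + (t - k) := by omega
            rw [e5, hrun (t - k) (by omega), hrun t le_rfl]
      have hstart' : i + t + 1 = 0 ∨ (0 < i + t + 1 ∧
          (i + t + 1 < arr.length → arr.getD (i + t + 1 - 1) 0 ≠ arr.getD (i + t + 1) 0)) := by
        right
        refine ⟨by omega, fun hlt => ?_⟩
        have e6 : i + t + 1 - 1 = i + t := by omega
        rw [e6, hrun t le_rfl]
        exact fun hh => hnext hlt hh.symm
      have hrec := cleanAux_eq_filter arr (i + t + 1) hstart'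
      unfold cleanAux
      rw [dif_pos h]
      simp only [hr]
      rw [hrec, hsplit, List.filter_append, List.filter_append,
          List.filter_eq_nil_iff.mpr hfalse]
      by_cases h5 : 5 ≤ t
      · rw [if_pos (by omega)]
        have : cleanCond arr (i + t) = true := hcond.mpr h5
        simp [this]
      · rw [if_neg (by omega)]
        have : cleanCond arr (i + t) = false := by
          rcases Bool.eq_false_or_eq_true (cleanCond arr (i + t)) with hb | hb
          · exact absurd (hcond.mp hb) h5
          · exact hb
        simp [this]
  · unfold cleanAux
    rw [dif_neg h]
    have e : arr.length - i = 0 := by omega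
    rw [e]
    simp
termination_by arr.length - i
decreasing_by omega

-- ===== VERDICT (by name: the statement is the Claim_ definition above) =====
theorem clean_array_spec : Claim_equal_clean_array := by
  intro arr _
  unfold Spec_clean_array clean_array clean_array_alt
  have h := cleanAux_eq_filter arr 0 (Or.inl rfl)
  simpa [List.range_eq_range'] using h
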